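-- pv_equiv track=rewrite | github.com/aisepucrio/stnl-dataminer | src/model/jira_api.py | remove_null_fields
-- ===== SOURCE A (Python) =====
-- def remove_null_fields(issues):
--     if not issues:
--         return issues
--
--     keys_to_remove = set(issues[0]['fields'].keys())
--     for issue in issues:
--         keys_to_remove &= {key for key, value in issue['fields'].items() if value is None}
--
--     for issue in issues:
--         for key in keys_to_remove:
--             del issue['fields'][key]
--
--     return issues
-- ===== SOURCE B (Python) =====
-- def remove_null_fields(issues):
--     if not issues:
--         return issues
--
--     # a key is removed iff it appears in the first issue's fields and is None in EVERY issue
--     keys_to_remove = {k for k, v in issues[0]['fields'].items()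
--                       if v is None and all(issue['fields'].get(k, 0) is None for issue in issues)}
--
--     for issue in issues:
--         issue['fields'] = {k: v for k, v in issue['fields'].items()
--                            if k not in keys_to_remove}
--
--     return issues
-- ===== Notes on version B (the rewrite author's own statement) =====
-- stated objective: alternative
-- what changed: Replaces A's incremental set intersection (seed with issue 0's key set, intersect with each issue's null-key set) by a direct per-key universal test (a key of issue 0's fields is removed iff every issue holds it as None), and replaces the in-place del loop by rebuilding each 'fields' dict with a comprehension that filters the removed keys out. Pre_ excludes inputs where an issue lacks a 'fields' key (A raises KeyError there) and association lists with duplicate keys, which no real Python dict can produce.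
import Mathlib
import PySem

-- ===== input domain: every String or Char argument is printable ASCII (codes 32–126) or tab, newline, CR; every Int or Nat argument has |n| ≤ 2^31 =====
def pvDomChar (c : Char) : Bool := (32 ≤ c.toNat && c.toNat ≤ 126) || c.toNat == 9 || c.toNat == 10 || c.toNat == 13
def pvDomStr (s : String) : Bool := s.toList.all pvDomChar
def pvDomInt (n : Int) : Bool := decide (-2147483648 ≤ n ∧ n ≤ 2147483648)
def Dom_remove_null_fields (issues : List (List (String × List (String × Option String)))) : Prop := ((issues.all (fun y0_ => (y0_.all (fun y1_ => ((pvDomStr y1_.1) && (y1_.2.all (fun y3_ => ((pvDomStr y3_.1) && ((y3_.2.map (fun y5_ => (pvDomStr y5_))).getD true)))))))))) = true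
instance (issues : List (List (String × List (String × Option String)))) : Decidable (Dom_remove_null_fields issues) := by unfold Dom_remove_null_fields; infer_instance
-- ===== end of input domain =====

-- B replaces A's incremental set intersection by a direct per-key universal test (a key of issue 0's
-- fields is removed iff it is None in every issue) and rebuilds each 'fields' dict by filtering
-- instead of an in-place del loop. Both Pythons mutate their argument; the equivalence proved here
-- is about the return value only (A also mutates the inner 'fields' dicts in place, B rebinds them).

-- issue['fields'] (first-match dict lookup; Pre_ guarantees the key is present)
def pvFields (issue : List (String × List (String × Option String))) : List (String × Option String) :=
  ((PySem.Dict.mk issue).get? "fields").getD []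

-- ===== PORT A =====
def remove_null_fields (issues : List (List (String × List (String × Option String)))) : List (List (String × List (String × Option String))) :=
  if issues.isEmpty then issues else
  let keys0 : PySem.Set String :=
    PySem.Set.ofList (PySem.Dict.mk (pvFields ((PySem.List.pyGet? issues 0).getD []))).keys
  let keys_to_remove : PySem.Set String :=
    issues.foldl (fun s issue =>
      PySem.Set.inter s (PySem.Set.ofList
        (((PySem.Dict.mk (pvFields issue)).items.filter (fun p => p.2 == none)).map (·.1)))) keys0
  issues.map (fun issue =>
    ((PySem.Dict.mk issue).insert "fields"
      (keys_to_remove.foldl (fun d k => d.erase k) (PySem.Dict.mk (pvFields issue))).items).items)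

-- ===== PORT B =====
-- issue['fields'] via .get with a default (B looks the key up with getD; Pre_ guarantees presence)
def pvFieldsB (issue : List (String × List (String × Option String))) : List (String × Option String) :=
  (PySem.Dict.mk issue).getD "fields" []

-- issue['fields'].get(k, 0) is None  ⇔  the dict maps k to None  (exact: the default 0 is not None)
def pvNullEverywhere (issues : List (List (String × List (String × Option String)))) (k : String) : Bool :=
  issues.all (fun issue => (PySem.Dict.mk (pvFieldsB issue)).get? k == some none)

def remove_null_fields_alt (issues : List (List (String × List (String × Option String)))) : List (List (String × List (String × Option String))) :=
  match issues with
  | [] => []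
  | i0 :: _ =>
    let keys_to_remove : PySem.Set String :=
      PySem.Set.ofList
        (((PySem.Dict.mk (pvFieldsB i0)).items.filter
            (fun p => p.2 == none && pvNullEverywhere issues p.1)).map Prod.fst)
    -- the dict comprehension iterates a dict's items (distinct keys), so its item list is exactly
    -- the filtered item list
    issues.map (fun issue =>
      ((PySem.Dict.mk issue).insert "fields"
        ((PySem.Dict.mk (pvFieldsB issue)).items.filter
          (fun p => !(PySem.Set.contains keys_to_remove p.1)))).items)

-- ===== PRECONDITION & SPEC =====
-- Pre_ excludes inputs where some issue lacks a 'fields' key (Python A raises KeyError there) and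
-- association lists with duplicate keys, which do not represent any real Python dict.
def Pre_remove_null_fields (issues : List (List (String × List (String × Option String)))) : Prop :=
  ∀ issue ∈ issues, (issue.map Prod.fst).Nodup ∧ "fields" ∈ issue.map Prod.fst ∧
    ∀ p ∈ issue, (p.2.map Prod.fst).Nodup
instance (issues : List (List (String × List (String × Option String)))) : Decidable (Pre_remove_null_fields issues) := by unfold Pre_remove_null_fields; infer_instance

def pvWitness_remove_null_fields : (List (List (String × List (String × Option String)))) :=
  [[("fields", [("a", none), ("b", some "x")]), ("id", [])],
   [("fields", [("a", none), ("b", none)])]]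

def Spec_remove_null_fields (issues : List (List (String × List (String × Option String)))) (out : List (List (String × List (String × Option String)))) : Prop := out = remove_null_fields_alt issues
instance (issues : List (List (String × List (String × Option String)))) (out : List (List (String × List (String × Option String)))) : Decidable (Spec_remove_null_fields issues out) := by unfold Spec_remove_null_fields; infer_instance

-- ===== CLAIM (what is proved, stated in full; the proofs are below) =====
def Claim_equal_remove_null_fields : Prop := ∀ (issues : List (List (String × List (String × Option String)))), Dom_remove_null_fields issues → Pre_remove_null_fields issues → Spec_remove_null_fields issues (remove_null_fields issues)

-- ===== LEMMAS AND PROOFS =====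

-- membership in A's intersection fold
lemma mem_foldl_inter (g : List (String × List (String × Option String)) → PySem.Set String)
    (l : List (List (String × List (String × Option String)))) (s : PySem.Set String) (x : String) :
    x ∈ l.foldl (fun s i => PySem.Set.inter s (g i)) s ↔ x ∈ s ∧ ∀ i ∈ l, x ∈ g i := by
  induction l generalizing s with
  | nil => simp
  | cons h t ih =>
    simp only [List.foldl_cons, ih, PySem.Set.mem_inter, List.mem_cons]
    constructor
    · rintro ⟨⟨hs, hg⟩, hall⟩
      refine ⟨hs, ?_⟩
      rintro i (rfl | hi)
      · exact hg
      · exact hall i hi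
    · rintro ⟨hs, hall⟩
      exact ⟨⟨hs, hall h (Or.inl rfl)⟩, fun i hi => hall i (Or.inr hi)⟩

-- erasing a list of keys is filtering the dict by non-membership
lemma foldl_erase_eq_filter {ν : Type} (l : List String) (d : PySem.Dict String ν) :
    l.foldl (fun d k => d.erase k) d
      = PySem.Dict.mk (d.items.filter (fun p => decide (p.1 ∉ l))) := by
  induction l generalizing d with
  | nil => simp
  | cons h t ih =>
    rw [List.foldl_cons, ih]
    cases d with
    | mk l =>
      simp only [PySem.Dict.erase]
      congr 1
      rw [List.filter_filter]
      apply List.filter_congr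
      intro p _
      by_cases hp : p.1 = h <;> simp [hp]

-- B's field lookup is A's field lookup
lemma pvFieldsB_eq (issue : List (String × List (String × Option String))) :
    pvFieldsB issue = pvFields issue := by
  simp [pvFieldsB, pvFields, PySem.Dict.getD_eq_get?_getD]

-- under Pre_, each issue's fields association list has Nodup keys
lemma nodup_fields_keys (issue : List (String × List (String × Option String)))
    (h : ∀ p ∈ issue, (p.2.map Prod.fst).Nodup) :
    ((pvFields issue).map Prod.fst).Nodup := by
  unfold pvFields
  cases hg : (PySem.Dict.mk issue).get? "fields" with
  | none => simp
  | some v =>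
    have hv : ("fields", v) ∈ issue := by
      have := PySem.Dict.mem_items_of_get?_eq_some _ hg
      simpa using this
    simpa using h _ hv

-- with Nodup keys, membership of (x, none) in the items is exactly get? x = some none
lemma mem_null_iff_get? (issue : List (String × List (String × Option String)))
    (hnd : ((pvFields issue).map Prod.fst).Nodup) (x : String) :
    (∃ p ∈ (PySem.Dict.mk (pvFields issue)).items, p.1 = x ∧ p.2 = none)
      ↔ (PySem.Dict.mk (pvFields issue)).get? x = some none := by
  have hk : (PySem.Dict.mk (pvFields issue)).keys.Nodup := by
    simpa [PySem.Dict.keys] using hnd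
  constructor
  · rintro ⟨⟨k, v⟩, hp, rfl, rfl⟩
    exact PySem.Dict.get?_of_mem_items _ hp hk
  · intro hg
    exact ⟨(x, none), PySem.Dict.mem_items_of_get?_eq_some _ hg, rfl, rfl⟩

-- ===== VERDICT (by name: the statement is the Claim_ definition above) =====
theorem remove_null_fields_spec : Claim_equal_remove_null_fields := by
  intro issues _hdom hpre
  unfold Spec_remove_null_fields remove_null_fields remove_null_fields_alt
  cases issues with
  | nil => rfl
  | cons i0 t =>
    simp only [List.isEmpty_cons, Bool.false_eq_true, if_false]
    have hnd : ∀ i ∈ (i0 :: t), ((pvFields i).map Prod.fst).Nodup :=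
      fun i hi => nodup_fields_keys i (hpre i hi).2.2
    -- both key sets have the same members: x is removed iff every issue maps x to none
    have hsame : ∀ x,
        (x ∈ (i0 :: t).foldl (fun s issue =>
            PySem.Set.inter s (PySem.Set.ofList
              (((PySem.Dict.mk (pvFields issue)).items.filter (fun p => p.2 == none)).map (·.1))))
            (PySem.Set.ofList (PySem.Dict.mk (pvFields ((PySem.List.pyGet? (i0 :: t) 0).getD []))).keys))
        ↔ (x ∈ PySem.Set.ofList
            (((PySem.Dict.mk (pvFieldsB i0)).items.filter
                (fun p => p.2 == none && pvNullEverywhere (i0 :: t) p.1)).map Prod.fst)) := by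
      intro x
      have hQ : ∀ i ∈ (i0 :: t),
          ((x ∈ ((PySem.Dict.mk (pvFields i)).items.filter (fun p => p.2 == none)).map (·.1))
            ↔ (PySem.Dict.mk (pvFields i)).get? x = some none) := by
        intro i hi
        rw [← mem_null_iff_get? i (hnd i hi) x]
        simp only [List.mem_map, List.mem_filter, beq_iff_eq]
        constructor
        · rintro ⟨p, ⟨hp, hv⟩, rfl⟩; exact ⟨p, hp, rfl, hv⟩
        · rintro ⟨p, hp, hx, hv⟩; exact ⟨p, ⟨hp, hv⟩, hx⟩
      rw [mem_foldl_inter]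
      simp only [PySem.Set.mem_ofList, pvFieldsB_eq]
      constructor
      · rintro ⟨_, hall⟩
        have hall' : ∀ i ∈ (i0 :: t), (PySem.Dict.mk (pvFields i)).get? x = some none :=
          fun i hi => (hQ i hi).mp (by simpa using hall i hi)
        have h0 := hall' i0 (List.mem_cons_self ..)
        refine List.mem_map.mpr ⟨(x, none),
          List.mem_filter.mpr ⟨PySem.Dict.mem_items_of_get?_eq_some _ h0, ?_⟩, rfl⟩
        simp only [beq_self_eq_true, Bool.true_and, pvNullEverywhere, List.all_eq_true]
        intro i hi
        simpa [pvFieldsB_eq] using hall' i hi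
      · intro hx
        obtain ⟨p, hp, rfl⟩ := List.mem_map.mp hx
        obtain ⟨hpi, hcond⟩ := List.mem_filter.mp hp
        simp only [Bool.and_eq_true, beq_iff_eq, pvNullEverywhere, List.all_eq_true] at hcond
        have hall : ∀ i ∈ (i0 :: t), (PySem.Dict.mk (pvFields i)).get? p.1 = some none := by
          intro i hi
          simpa [pvFieldsB_eq] using hcond.2 i hi
        refine ⟨?_, fun i hi => by simpa using (hQ i hi).mpr (hall i hi)⟩
        have h0 := hall i0 (List.mem_cons_self ..)
        have hmem : (p.1, (none : Option String)) ∈ (PySem.Dict.mk (pvFields i0)).items :=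
          PySem.Dict.mem_items_of_get?_eq_some _ h0
        have h00 : (PySem.List.pyGet? (i0 :: t) 0).getD [] = i0 := by simp [pysem]
        rw [h00]
        simp only [PySem.Dict.keys]
        exact List.mem_map.mpr ⟨(p.1, none), hmem, rfl⟩
    -- per issue, A's erase fold and B's filter produce the same fields dict
    refine List.map_congr_left (fun issue _ => ?_)
    rw [foldl_erase_eq_filter, pvFieldsB_eq]
    congr 2
    apply List.filter_congr
    intro p _
    have hs := hsame p.1
    rw [pvFieldsB_eq] at hs
    rw [PySem.Set.contains_eq_decide, decide_not]
    exact congrArg (! ·) (decide_eq_decide.mpr hs)
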